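-- pv_equiv track=rewrite | github.com/padowi/AdventOfCode2020 | 15/a.py | find_last_occurrence_or_add
-- ===== SOURCE A (Python) =====
-- def find_last_occurrence_or_add(x, seq):
--     # damnit... the way I am structuring runner below,
--     # I'll never get to use this fancy function... :'(
--     # I wrote it as a tracer before I had read the full requiremens...
--     # so now instead of this, I'll just build some other function
--     # that will make more sense for the task, but I like the ugliness
--     # of this function so very much that even though it is dead code
--     # I'll leave it in here.
--     for i in range(1, len(seq) + 1):
--         try:
--             idx = seq.index(x, i * -1)
--             if True: # what a nasty piece of ugly-hack you are, I love it!
--                 break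
--         except ValueError:
--             continue
--     else: # woho, finally got to use for/else!!!
--         seq.append(x)
--         idx = len(seq)
--
--     return (seq, idx)
-- ===== SOURCE B (Python) =====
-- def find_last_occurrence_or_add(x, seq):
--     # One forward pass instead of A's repeated suffix scans with list.index.
--     # Like A, appends to seq in place when x is absent (same observable mutation),
--     # and in that case returns the new length as the index, matching A.
--     idx = None
--     for i, v in enumerate(seq):
--         if v == x:
--             idx = i
--     if idx is None:
--         seq.append(x)
--         idx = len(seq)
--     return (seq, idx)
-- ===== Notes on version B (the rewrite author's own statement) =====
-- stated objective: simpler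
-- what changed: Replaces A's for/else over growing suffixes with repeated list.index calls (plus try/except), which is O(n^2), by a single O(n) forward enumerate pass that records the last matching index; the absent case (append, idx = new length) is reproduced exactly.
import Mathlib
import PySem

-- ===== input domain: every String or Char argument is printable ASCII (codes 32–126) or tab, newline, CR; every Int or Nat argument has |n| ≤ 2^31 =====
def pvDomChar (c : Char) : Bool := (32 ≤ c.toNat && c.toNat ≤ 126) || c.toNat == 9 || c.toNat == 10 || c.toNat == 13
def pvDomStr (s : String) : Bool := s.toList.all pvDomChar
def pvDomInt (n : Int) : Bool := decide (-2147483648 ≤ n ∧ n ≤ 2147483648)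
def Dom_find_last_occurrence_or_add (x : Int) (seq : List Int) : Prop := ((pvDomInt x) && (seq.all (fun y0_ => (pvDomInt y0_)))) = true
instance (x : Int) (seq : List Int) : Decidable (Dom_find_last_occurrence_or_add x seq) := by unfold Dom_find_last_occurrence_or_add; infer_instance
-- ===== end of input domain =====

-- B replaces A's for/else of repeated suffix scans (list.index with negative start)
-- by a single forward pass recording the last matching index; simpler, same values.
-- Both A and B append x to seq in place when x is absent (same observable mutation).


-- ===== PORT A =====
-- seq.index(x, -i): for 1 ≤ i ≤ len(seq) the negative start -i clamps to len - i,
-- so it searches seq[len-i:] and reports the index relative to seq (hand port, exact there).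
def pvATry (x : Int) (seq : List Int) (i : Nat) : Option Int :=
  (PySem.List.index? (seq.drop (seq.length - i)) x).map
    (fun k => ((seq.length - i + k : Nat) : Int))

-- the for/else loop: first i in range(1, len+1) whose try succeeds breaks with idx
def pvALoop (x : Int) (seq : List Int) : List Int → Option Int
  | [] => none
  | i :: rest =>
    match pvATry x seq i.toNat with
    | some idx => some idx
    | none => pvALoop x seq rest

def find_last_occurrence_or_add (x : Int) (seq : List Int) : List Int × Int :=
  match pvALoop x seq (PySem.List.pyRange 1 ((seq.length : Int) + 1) 1) with
  | some idx => (seq, idx)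
  | none =>
    let s := seq ++ [x]
    (s, (s.length : Int))

-- ===== PORT B =====
def find_last_occurrence_or_add_alt (x : Int) (seq : List Int) : List Int × Int :=
  -- for i, v in enumerate(seq): if v == x: idx = i   (zipIdx pairs are (value, index))
  let idx? : Option Nat :=
    (seq.zipIdx).foldl (fun acc p => if p.1 = x then some p.2 else acc) none
  match idx? with
  | some i => (seq, (i : Int))
  | none =>
    let s := seq ++ [x]
    (s, (s.length : Int))

-- ===== PRECONDITION & SPEC =====
def Spec_find_last_occurrence_or_add (x : Int) (seq : List Int) (out : List Int × Int) : Prop := out = find_last_occurrence_or_add_alt x seq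
instance (x : Int) (seq : List Int) (out : List Int × Int) : Decidable (Spec_find_last_occurrence_or_add x seq out) := by unfold Spec_find_last_occurrence_or_add; infer_instance

-- ===== CLAIM (what is proved, stated in full; the proofs are below) =====
def Claim_equal_find_last_occurrence_or_add : Prop := ∀ (x : Int) (seq : List Int), Dom_find_last_occurrence_or_add x seq → Spec_find_last_occurrence_or_add x seq (find_last_occurrence_or_add x seq)

-- ===== LEMMAS AND PROOFS =====

-- index of the LAST occurrence of x (proof-side characterisation shared by both ports)
def pvLastIdx? (x : Int) : List Int → Option Nat
  | [] => none
  | h :: t =>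
    match pvLastIdx? x t with
    | some k => some (k + 1)
    | none => if h = x then some 0 else none

theorem pvLastIdx?_eq_none (x : Int) (l : List Int) (h : x ∉ l) : pvLastIdx? x l = none := by
  induction l with
  | nil => rfl
  | cons a t ih =>
    simp only [List.mem_cons, not_or] at h
    simp [pvLastIdx?, ih h.2, Ne.symm h.1]

theorem pvLastIdx?_eq_some (x : Int) (l : List Int) (p : Nat) (hp : p < l.length)
    (hx : l[p] = x) (hno : x ∉ l.drop (p + 1)) : pvLastIdx? x l = some p := by
  induction l generalizing p with
  | nil => simp at hp
  | cons a t ih =>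
    cases p with
    | zero =>
      simp only [List.getElem_cons_zero] at hx
      simp only [List.drop_succ_cons, List.drop_zero] at hno
      simp [pvLastIdx?, pvLastIdx?_eq_none x t hno, hx]
    | succ q =>
      simp only [List.length_cons, Nat.succ_lt_succ_iff] at hp
      simp only [List.getElem_cons_succ] at hx
      simp only [List.drop_succ_cons] at hno
      simp [pvLastIdx?, ih q hp hx hno]

theorem pvB_foldl (x : Int) (l : List Int) : ∀ (n : Nat) (acc : Option Nat),
    (l.zipIdx n).foldl (fun acc p => if p.1 = x then some p.2 else acc) acc =
      (match pvLastIdx? x l with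
       | some k => some (n + k)
       | none => acc) := by
  induction l with
  | nil => intro n acc; rfl
  | cons a t ih =>
    intro n acc
    simp only [List.zipIdx_cons, List.foldl_cons, ih]
    cases h : pvLastIdx? x t with
    | some k => simp [pvLastIdx?, h, Nat.add_assoc, Nat.add_comm 1 k]
    | none =>
      by_cases ha : a = x <;> simp [pvLastIdx?, h, ha]

theorem pvALoop_spec (x : Int) (seq : List Int) : ∀ (m j : Nat), j + m = seq.length + 1 →
    1 ≤ j → x ∉ seq.drop (seq.length + 1 - j) →
    pvALoop x seq (PySem.List.pyRange (j : Int) ((seq.length : Int) + 1) 1) =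
      (pvLastIdx? x seq).map (fun k => (k : Int)) := by
  intro m
  induction m with
  | zero =>
    intro j hm hj hno
    have hj' : j = seq.length + 1 := by omega
    subst hj'
    rw [PySem.List.pyRange_one_eq_nil (by omega)]
    simp only [Nat.sub_self, List.drop_zero] at hno
    simp [pvALoop, pvLastIdx?_eq_none x seq hno]
  | succ m' ih =>
    intro j hm hj hno
    have hjlen : j ≤ seq.length := by omega
    rw [PySem.List.pyRange_one_cons (by omega)]
    simp only [pvALoop, Int.toNat_natCast]
    have hdropidx : seq.length + 1 - j = (seq.length - j) + 1 := by omega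
    rw [hdropidx] at hno
    by_cases hmem : x ∈ seq.drop (seq.length - j)
    · -- the suffix of length j contains x: its head is x, index is 0
      have hlt : seq.length - j < seq.length := by omega
      have hcons : seq.drop (seq.length - j) =
          seq[seq.length - j] :: seq.drop (seq.length - j + 1) :=
        List.drop_eq_getElem_cons hlt
      have hhead : seq[seq.length - j] = x := by
        rw [hcons] at hmem
        rcases List.mem_cons.mp hmem with h | h
        · exact h.symm
        · exact absurd h hno
      have hidx : PySem.List.index? (seq.drop (seq.length - j)) x = some 0 := by
        rw [hcons, hhead]; exact PySem.List.index?_cons_self _ _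
      rw [pvATry, hidx]
      rw [pvLastIdx?_eq_some x seq (seq.length - j) hlt hhead hno]
      simp
    · -- not found in this suffix: try fails, continue with i+1
      have hidx : PySem.List.index? (seq.drop (seq.length - j)) x = none :=
        (PySem.List.index?_eq_none_iff _ _).mpr hmem
      rw [pvATry, hidx]
      simp only [Option.map_none]
      have hcast : (j : Int) + 1 = ((j + 1 : Nat) : Int) := by push_cast; ring
      rw [hcast]
      exact ih (j + 1) (by omega) (by omega) (by rw [show seq.length + 1 - (j+1) = seq.length - j by omega]; exact hmem)

-- ===== VERDICT (by name: the statement is the Claim_ definition above) =====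
theorem find_last_occurrence_or_add_spec : Claim_equal_find_last_occurrence_or_add := by
  intro x seq _
  unfold Spec_find_last_occurrence_or_add find_last_occurrence_or_add find_last_occurrence_or_add_alt
  have hA := pvALoop_spec x seq seq.length 1 (by omega) (by omega)
        (by simp)
  rw [Nat.cast_one] at hA
  rw [hA]
  rw [pvB_foldl x seq 0 none]
  cases h : pvLastIdx? x seq with
  | some k => simp
  | none => simp
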